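-- pv_equiv track=rewrite | github.com/snchakri/lumen_25028_ttms | test_suite_generator/src/validation/layers/l3_temporal.py | _find_overlaps
-- ===== SOURCE A (Python) =====
-- from typing import Any, Dict, List, Tuple
--
-- def _find_overlaps(slots: List[Tuple[int, int, str]]) -> List[Tuple[str, str]]:
--     """Find overlapping time slots using sweep line."""
--     if len(slots) < 2:
--         return []
--
--     # Sort by start time
--     sorted_slots = sorted(slots, key=lambda x: x[0])
--     overlaps = []
--
--     for i in range(len(sorted_slots) - 1):
--         start1, end1, id1 = sorted_slots[i]
--         for j in range(i + 1, len(sorted_slots)):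
--             start2, end2, id2 = sorted_slots[j]
--
--             # If start2 >= end1, no more overlaps for slot i
--             if start2 >= end1:
--                 break
--
--             # Overlap detected
--             overlaps.append((id1, id2))
--
--     return overlaps
-- ===== SOURCE B (Python) =====
-- def _find_overlaps(slots):
--     """Find overlapping time slots by an exhaustive pairwise check on the sorted list."""
--     ss = sorted(slots, key=lambda x: x[0])
--     return [(s1[2], s2[2])
--             for k, s1 in enumerate(ss)
--             for s2 in ss[k + 1:]
--             if s2[0] < s1[1]]
-- ===== Notes on version B (the rewrite author's own statement) =====
-- stated objective: idiomatic
-- what changed: Replaces the sweep with early break and explicit accumulator by a single list comprehension over all index pairs i<j of the sorted list (no guard, no break), filtering with the overlap test start_j < end_i; order-preservation follows from the sortedness of starts.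
import Mathlib
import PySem

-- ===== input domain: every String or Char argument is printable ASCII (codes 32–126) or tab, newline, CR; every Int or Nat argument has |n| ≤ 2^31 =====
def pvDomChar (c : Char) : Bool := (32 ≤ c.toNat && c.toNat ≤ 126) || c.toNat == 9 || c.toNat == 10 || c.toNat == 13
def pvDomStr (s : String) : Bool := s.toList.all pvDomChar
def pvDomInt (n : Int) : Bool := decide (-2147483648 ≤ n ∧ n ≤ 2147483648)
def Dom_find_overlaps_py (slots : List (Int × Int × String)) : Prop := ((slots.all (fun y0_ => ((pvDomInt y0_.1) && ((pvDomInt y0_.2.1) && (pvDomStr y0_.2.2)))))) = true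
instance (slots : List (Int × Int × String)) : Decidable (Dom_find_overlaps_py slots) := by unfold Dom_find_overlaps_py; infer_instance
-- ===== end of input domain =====

-- B replaces A's sweep (inner loop with early break, explicit accumulator) by one
-- comprehension over all pairs i<j of the sorted list; objective: more idiomatic, not faster.

-- ===== PORT A =====
-- inner 'for j in range(i+1, len)' over the suffix after slot i; 'if start2 >= end1: break'
def pvInnerA (end1 : Int) (id1 : String) : List (Int × Int × String) → List (String × String)
  | [] => []
  | (s2, _, id2) :: rest =>
    if s2 ≥ end1 then []                      -- break
    else (id1, id2) :: pvInnerA end1 id1 rest -- overlaps.append((id1, id2))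

-- outer 'for i in range(len(sorted_slots) - 1)': each slot with a nonempty suffix
def pvOuterA : List (Int × Int × String) → List (String × String)
  | [] => []
  | [_] => []
  | x :: y :: rest => pvInnerA x.2.1 x.2.2 (y :: rest) ++ pvOuterA (y :: rest)

def find_overlaps_py (slots : List (Int × Int × String)) : List (String × String) :=
  if slots.length < 2 then []
  else pvOuterA (PySem.List.sorted slots (fun x => x.1))

-- ===== PORT B =====
-- [(s1[2], s2[2]) for k, s1 in enumerate(ss) for s2 in ss[k+1:] if s2[0] < s1[1]]
def find_overlaps_py_alt (slots : List (Int × Int × String)) : List (String × String) :=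
  let ss := PySem.List.sorted slots (fun x => x.1)
  (PySem.List.enumerate ss).flatMap (fun p =>
    (PySem.List.slice ss (some (p.1 + 1)) none).filterMap (fun s2 =>
      if s2.1 < p.2.2.1 then some (p.2.2.2, s2.2.2) else none))

-- ===== PRECONDITION & SPEC =====
def Spec_find_overlaps_py (slots : List (Int × Int × String)) (out : List (String × String)) : Prop := out = find_overlaps_py_alt slots
instance (slots : List (Int × Int × String)) (out : List (String × String)) : Decidable (Spec_find_overlaps_py slots out) := by unfold Spec_find_overlaps_py; infer_instance

-- ===== CLAIM (what is proved, stated in full; the proofs are below) =====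
def Claim_equal_find_overlaps_py : Prop := ∀ (slots : List (Int × Int × String)), Dom_find_overlaps_py slots → Spec_find_overlaps_py slots (find_overlaps_py slots)

-- ===== LEMMAS AND PROOFS =====

-- filter-over-the-whole-tail body of B, for one slot
def pvPairsF (x : Int × Int × String) (r : List (Int × Int × String)) : List (String × String) :=
  r.filterMap (fun s2 => if s2.1 < x.2.1 then some (x.2.2, s2.2.2) else none)

-- all-pairs recursion: each element against its whole tail
def pvPairsRec : List (Int × Int × String) → List (String × String)
  | [] => []
  | x :: rest => pvPairsF x rest ++ pvPairsRec rest

-- B's enumerate/slice comprehension computes the all-pairs recursion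
theorem pvEnumFlat (r pre : List (Int × Int × String)) :
    (PySem.List.enumerate r (pre.length : Int)).flatMap (fun p =>
      (PySem.List.slice (pre ++ r) (some (p.1 + 1)) none).filterMap (fun s2 =>
        if s2.1 < p.2.2.1 then some (p.2.2.2, s2.2.2) else none))
    = pvPairsRec r := by
  induction r generalizing pre with
  | nil => simp [PySem.List.enumerate, pvPairsRec]
  | cons x rest ih =>
    rw [PySem.List.enumerate_cons, List.flatMap_cons, pvPairsRec]
    have hslice : PySem.List.slice (pre ++ x :: rest) (some ((pre.length : Int) + 1)) none = rest := by
      rw [PySem.List.slice_some_none]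
      have h1 : ((pre.length : Int) + 1) = ((pre.length + 1 : Nat) : Int) := by push_cast; ring
      rw [h1, PySem.List.clampIdx_natCast]
      have h2 : pre ++ x :: rest = (pre ++ [x]) ++ rest := by simp
      rw [h2]
      have h3 : min (pre.length + 1) ((pre ++ [x]) ++ rest).length = (pre ++ [x]).length := by
        simp
      rw [h3, List.drop_left]
    rw [hslice]
    have h4 : (pre.length : Int) + 1 = ((pre ++ [x]).length : Int) := by simp
    have h5 : pre ++ x :: rest = (pre ++ [x]) ++ rest := by simp
    rw [h4]
    have := ih (pre ++ [x])
    rw [h5, this, pvPairsF]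

-- on a tail whose starts are all ≥ the break point once reached, A's break loses nothing
theorem pvInner_eq (x : Int × Int × String) (r : List (Int × Int × String))
    (hr : r.Pairwise (fun a b => a.1 ≤ b.1)) :
    pvInnerA x.2.1 x.2.2 r = pvPairsF x r := by
  induction r with
  | nil => rfl
  | cons s2 rest ih =>
    rcases List.pairwise_cons.mp hr with ⟨hall, htail⟩
    obtain ⟨a2, b2, i2⟩ := s2
    by_cases h : a2 ≥ x.2.1
    · simp only [pvInnerA, if_pos h, pvPairsF, List.filterMap_cons]
      have hc : ¬ (a2 < x.2.1) := by omega
      rw [if_neg hc]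
      symm
      rw [List.filterMap_eq_nil_iff]
      intro y hy
      have h6 : a2 ≤ y.1 := hall y hy
      have h7 : ¬ (y.1 < x.2.1) := by omega
      simp [h7]
    · simp only [pvInnerA, if_neg h, pvPairsF, List.filterMap_cons]
      have hc : a2 < x.2.1 := by omega
      rw [if_pos hc, ih htail]
      rfl

theorem pvOuter_eq (ss : List (Int × Int × String))
    (h : ss.Pairwise (fun a b => a.1 ≤ b.1)) :
    pvOuterA ss = pvPairsRec ss := by
  induction ss with
  | nil => rfl
  | cons x rest ih =>
    rcases List.pairwise_cons.mp h with ⟨_, htail⟩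
    cases rest with
    | nil => simp [pvOuterA, pvPairsRec, pvPairsF]
    | cons y r2 =>
      rw [pvOuterA, pvPairsRec, pvInner_eq x (y :: r2) htail, ih htail]

theorem pvOuter_short (ss : List (Int × Int × String)) (h : ss.length < 2) :
    pvPairsRec ss = [] := by
  match ss, h with
  | [], _ => rfl
  | [x], _ => simp [pvPairsRec, pvPairsF]

-- ===== VERDICT (by name: the statement is the Claim_ definition above) =====
theorem find_overlaps_py_spec : Claim_equal_find_overlaps_py := by
  intro slots _
  unfold Spec_find_overlaps_py find_overlaps_py find_overlaps_py_alt
  have hB := pvEnumFlat (PySem.List.sorted slots (fun x => x.1)) []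
  simp only [List.length_nil, Nat.cast_zero, List.nil_append] at hB
  rw [hB]
  have hp := PySem.List.sorted_pairwise slots (fun x => x.1)
  split_ifs with h
  · have hlen : (PySem.List.sorted slots (fun x => x.1)).length < 2 := by
      rw [PySem.List.length_sorted]; exact h
    exact (pvOuter_short _ hlen).symm
  · exact pvOuter_eq _ hp
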